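-- pv_equiv track=rewrite | github.com/taka2/atcoder | abc274/d.py | hantei
-- ===== SOURCE A (Python) =====
-- def hantei(goal, movelist):
--     list = {0: 0}
--     for elem in movelist:
--         resultList = {}
--         for a in list:
--             plus = a + elem
--             minus = a - elem
--             if (plus not in resultList):
--                 resultList[plus] = 0
--             if (minus not in resultList):
--                 resultList[minus] = 0
--         list = resultList
--
--     return goal in list
-- ===== SOURCE B (Python) =====
-- def hantei(goal, movelist):
--     # Meet in the middle: reachable sums of each half, then look up the complement.
--     half = len(movelist) // 2
--     left = {0}
--     for m in movelist[:half]: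
--         left = {a + m for a in left} | {a - m for a in left}
--     right = {0}
--     for m in movelist[half:]:
--         right = {a + m for a in right} | {a - m for a in right}
--     return any(goal - s in right for s in left)
-- ===== Notes on version B (the rewrite author's own statement) =====
-- stated objective: faster
-- what changed: Replaces A's single dict-expansion over the whole move list by meet-in-the-middle: reachable signed sums of each half are built as sets and the answer is a complement lookup of goal minus each left sum in the right set.
import Mathlib
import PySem

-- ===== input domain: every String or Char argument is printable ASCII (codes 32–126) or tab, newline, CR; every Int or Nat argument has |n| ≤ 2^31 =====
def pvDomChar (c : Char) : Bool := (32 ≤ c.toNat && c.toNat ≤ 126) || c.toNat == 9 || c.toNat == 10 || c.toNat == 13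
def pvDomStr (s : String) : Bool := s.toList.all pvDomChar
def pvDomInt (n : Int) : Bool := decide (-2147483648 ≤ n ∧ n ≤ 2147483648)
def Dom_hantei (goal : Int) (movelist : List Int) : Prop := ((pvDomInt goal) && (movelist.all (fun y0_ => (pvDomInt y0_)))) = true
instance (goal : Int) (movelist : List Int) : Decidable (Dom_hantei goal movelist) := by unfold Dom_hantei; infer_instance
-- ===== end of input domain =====

-- B replaces A's single dict-expansion over the whole list by meet-in-the-middle: reachable sums
-- of each half as sets, then a complement lookup (objective: faster in the sparse/large-value regime).

-- ===== PORT A =====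
-- body of 'for a in list': conditional inserts of a+elem and a-elem into resultList
def pvInnerStep (elem : Int) (resultList : PySem.Dict Int Int) (a : Int) : PySem.Dict Int Int :=
  let plus := a + elem
  let minus := a - elem
  let r1 := if resultList.contains plus then resultList else resultList.insert plus 0
  if r1.contains minus then r1 else r1.insert minus 0

-- body of 'for elem in movelist': rebuild resultList from the current dict's keys
def pvOuterStep (lst : PySem.Dict Int Int) (elem : Int) : PySem.Dict Int Int :=
  lst.keys.foldl (pvInnerStep elem) PySem.Dict.empty

def hantei (goal : Int) (movelist : List Int) : Bool :=
  (movelist.foldl pvOuterStep (PySem.Dict.ofList [(0, 0)])).contains goal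

-- ===== PORT B =====
-- loop body: acc = {a + m for a in acc} | {a - m for a in acc}
def pvSumStep (acc : PySem.Set Int) (m : Int) : PySem.Set Int :=
  PySem.Set.union (PySem.Set.ofList (acc.map (fun a => a + m))) (acc.map (fun a => a - m))

def hantei_alt (goal : Int) (movelist : List Int) : Bool :=
  let half := movelist.length / 2
  let left := (movelist.take half).foldl pvSumStep (PySem.Set.ofList [0])
  let right := (movelist.drop half).foldl pvSumStep (PySem.Set.ofList [0])
  left.any (fun s => PySem.Set.contains right (goal - s))

-- ===== PRECONDITION & SPEC =====
def Spec_hantei (goal : Int) (movelist : List Int) (out : Bool) : Prop := out = hantei_alt goal movelist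
instance (goal : Int) (movelist : List Int) (out : Bool) : Decidable (Spec_hantei goal movelist out) := by unfold Spec_hantei; infer_instance

-- ===== CLAIM (what is proved, stated in full; the proofs are below) =====
def Claim_equal_hantei : Prop := ∀ (goal : Int) (movelist : List Int), Dom_hantei goal movelist → Spec_hantei goal movelist (hantei goal movelist)

-- ===== LEMMAS AND PROOFS =====

-- x is a sum of the moves of l, each taken with sign + or -
def pvSg : List Int → Int → Prop
  | [], x => x = 0
  | m :: l, x => ∃ y, pvSg l y ∧ (x = y + m ∨ x = y - m)

lemma mem_keys_condInsert (d : PySem.Dict Int Int) (p x : Int) :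
    x ∈ (if d.contains p then d else d.insert p 0).keys ↔ x = p ∨ x ∈ d.keys := by
  split_ifs with h
  · constructor
    · exact Or.inr
    · rintro (rfl | hx)
      · exact (PySem.Dict.contains_iff_mem_keys _ _).mp h
      · exact hx
  · exact PySem.Dict.mem_keys_insert d p x 0

lemma mem_keys_pvInnerStep (e : Int) (r : PySem.Dict Int Int) (a x : Int) :
    x ∈ (pvInnerStep e r a).keys ↔ x = a + e ∨ x = a - e ∨ x ∈ r.keys := by
  unfold pvInnerStep
  simp only [mem_keys_condInsert]
  tauto

lemma mem_keys_innerFold (e : Int) (l : List Int) (d : PySem.Dict Int Int) (x : Int) :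
    x ∈ (l.foldl (pvInnerStep e) d).keys ↔ x ∈ d.keys ∨ ∃ a ∈ l, x = a + e ∨ x = a - e := by
  induction l generalizing d with
  | nil => simp
  | cons a l ih =>
    simp only [List.foldl_cons, ih, mem_keys_pvInnerStep, List.mem_cons]
    constructor
    · rintro ((h | h | h) | ⟨b, hb, h⟩)
      · exact Or.inr ⟨a, Or.inl rfl, Or.inl h⟩
      · exact Or.inr ⟨a, Or.inl rfl, Or.inr h⟩
      · exact Or.inl h
      · exact Or.inr ⟨b, Or.inr hb, h⟩
    · rintro (h | ⟨b, (rfl | hb), h⟩)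
      · exact Or.inl (Or.inr (Or.inr h))
      · rcases h with h | h
        · exact Or.inl (Or.inl h)
        · exact Or.inl (Or.inr (Or.inl h))
      · exact Or.inr ⟨b, hb, h⟩

lemma mem_keys_pvOuterStep (lst : PySem.Dict Int Int) (e x : Int) :
    x ∈ (pvOuterStep lst e).keys ↔ ∃ a ∈ lst.keys, x = a + e ∨ x = a - e := by
  unfold pvOuterStep
  simp [mem_keys_innerFold]

-- A's whole loop: x survives iff it is some start key plus a signed sum of l
lemma mem_keys_foldA (l : List Int) (d : PySem.Dict Int Int) (x : Int) :
    x ∈ (l.foldl pvOuterStep d).keys ↔ ∃ a ∈ d.keys, ∃ s, pvSg l s ∧ x = a + s := by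
  induction l generalizing d with
  | nil => simp [pvSg]
  | cons m l ih =>
    simp only [List.foldl_cons, ih, mem_keys_pvOuterStep]
    constructor
    · rintro ⟨a', ⟨a, ha, hpm | hpm⟩, s, hs, rfl⟩
      · exact ⟨a, ha, s + m, ⟨s, hs, Or.inl rfl⟩, by rw [hpm]; ring⟩
      · exact ⟨a, ha, s - m, ⟨s, hs, Or.inr rfl⟩, by rw [hpm]; ring⟩
    · rintro ⟨a, ha, t, ⟨y, hy, rfl | rfl⟩, rfl⟩
      · exact ⟨a + m, ⟨a, ha, Or.inl rfl⟩, y, hy, by ring⟩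
      · exact ⟨a - m, ⟨a, ha, Or.inr rfl⟩, y, hy, by ring⟩

lemma mem_pvSumStep (acc : PySem.Set Int) (m x : Int) :
    x ∈ pvSumStep acc m ↔ ∃ a ∈ acc, x = a + m ∨ x = a - m := by
  simp only [pvSumStep, PySem.Set.mem_union, PySem.Set.mem_ofList, List.mem_map]
  constructor
  · rintro (⟨a, ha, rfl⟩ | ⟨a, ha, rfl⟩)
    · exact ⟨a, ha, Or.inl rfl⟩
    · exact ⟨a, ha, Or.inr rfl⟩
  · rintro ⟨a, ha, rfl | rfl⟩
    · exact Or.inl ⟨a, ha, rfl⟩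
    · exact Or.inr ⟨a, ha, rfl⟩

-- B's half loop: same characterisation for the set fold
lemma mem_foldB (l : List Int) (acc : PySem.Set Int) (x : Int) :
    x ∈ l.foldl pvSumStep acc ↔ ∃ a ∈ acc, ∃ s, pvSg l s ∧ x = a + s := by
  induction l generalizing acc with
  | nil => simp [pvSg]
  | cons m l ih =>
    simp only [List.foldl_cons, ih, mem_pvSumStep]
    constructor
    · rintro ⟨a', ⟨a, ha, hpm | hpm⟩, s, hs, rfl⟩
      · exact ⟨a, ha, s + m, ⟨s, hs, Or.inl rfl⟩, by rw [hpm]; ring⟩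
      · exact ⟨a, ha, s - m, ⟨s, hs, Or.inr rfl⟩, by rw [hpm]; ring⟩
    · rintro ⟨a, ha, t, ⟨y, hy, rfl | rfl⟩, rfl⟩
      · exact ⟨a + m, ⟨a, ha, Or.inl rfl⟩, y, hy, by ring⟩
      · exact ⟨a - m, ⟨a, ha, Or.inr rfl⟩, y, hy, by ring⟩

lemma pvSg_append (l1 l2 : List Int) (x : Int) :
    pvSg (l1 ++ l2) x ↔ ∃ s1, pvSg l1 s1 ∧ pvSg l2 (x - s1) := by
  induction l1 generalizing x with
  | nil => simp [pvSg]
  | cons m l1 ih =>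
    simp only [List.cons_append, pvSg, ih]
    constructor
    · rintro ⟨y, ⟨s1, h1, h2⟩, rfl | rfl⟩
      · exact ⟨s1 + m, ⟨s1, h1, Or.inl rfl⟩,
          by have h : y + m - (s1 + m) = y - s1 := by ring
             rw [h]; exact h2⟩
      · exact ⟨s1 - m, ⟨s1, h1, Or.inr rfl⟩,
          by have h : y - m - (s1 - m) = y - s1 := by ring
             rw [h]; exact h2⟩
    · rintro ⟨t, ⟨y', hy', rfl | rfl⟩, h2⟩
      · exact ⟨x - m, ⟨y', hy',
          by have h : x - m - y' = x - (y' + m) := by ring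
             rw [h]; exact h2⟩, Or.inl (by ring)⟩
      · exact ⟨x + m, ⟨y', hy',
          by have h : x + m - y' = x - (y' - m) := by ring
             rw [h]; exact h2⟩, Or.inr (by ring)⟩

lemma keys_init : (PySem.Dict.ofList [((0:Int), (0:Int))]).keys = [0] := by decide

-- ===== VERDICT (by name: the statement is the Claim_ definition above) =====
theorem hantei_spec : Claim_equal_hantei := by
  intro goal movelist _
  simp only [Spec_hantei, hantei, hantei_alt]
  rw [PySem.Dict.contains_eq_decide_mem_keys, Bool.eq_iff_iff]
  simp only [decide_eq_true_eq, List.any_eq_true, PySem.Set.contains_iff]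
  rw [mem_keys_foldA, keys_init]
  constructor
  · rintro ⟨a, ha, s, hs, rfl⟩
    simp only [List.mem_singleton] at ha
    subst ha
    rw [← List.take_append_drop (movelist.length / 2) movelist] at hs
    rcases (pvSg_append _ _ _).mp hs with ⟨s1, h1, h2⟩
    refine ⟨s1, (mem_foldB _ _ _).mpr ⟨0, by simp [PySem.Set.mem_ofList], s1, h1, by ring⟩, ?_⟩
    exact (mem_foldB _ _ _).mpr ⟨0, by simp [PySem.Set.mem_ofList], 0 + s - s1, by simpa using h2, by ring⟩
  · rintro ⟨s1, hs1, hs2⟩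
    rcases (mem_foldB _ _ _).mp hs1 with ⟨a, ha, t, ht, rfl⟩
    rcases (mem_foldB _ _ _).mp hs2 with ⟨b, hb, u, hu, hbu⟩
    simp only [PySem.Set.mem_ofList, List.mem_singleton] at ha hb
    subst ha; subst hb
    refine ⟨0, by simp, t + u, ?_, by omega⟩
    rw [← List.take_append_drop (movelist.length / 2) movelist]
    exact (pvSg_append _ _ _).mpr ⟨t, ht, by simpa using hu⟩
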